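-- pv_equiv track=rewrite | github.com/niveshbansal07/NB-downloader-Backend | utils/video_processor.py | _extract_qualities
-- ===== SOURCE A (Python) =====
-- from typing import Dict, List, Optional, Tuple
--
-- def _extract_qualities(formats: List[Dict]) -> List[str]:
--     """Extract available video qualities from formats"""
--     qualities = set()
--
--     for fmt in formats:
--         height = fmt.get('height')
--         if height:
--             if height >= 1440:
--                 qualities.add('1440p')
--             elif height >= 1080:
--                 qualities.add('1080p')
--             elif height >= 720:
--                 qualities.add('720p')
--             elif height >= 480:
--                 qualities.add('480p')
--             elif height >= 360:
--                 qualities.add('360p')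
--
--     return sorted(list(qualities), key=lambda x: int(x.replace('p', '')), reverse=True)
-- ===== SOURCE B (Python) =====
-- def _extract_qualities(formats):
--     """Extract available video qualities from formats"""
--     BANDS = [(1440, None, '1440p'), (1080, 1440, '1080p'),
--              (720, 1080, '720p'), (480, 720, '480p'), (360, 480, '360p')]
--     heights = [h for f in formats for h in [f.get('height')] if h]
--     return [lab for lo, hi, lab in BANDS
--             if any(lo <= h and (hi is None or h < hi) for h in heights)]
-- ===== Notes on version B (the rewrite author's own statement) =====
-- stated objective: alternative
-- what changed: Replaces the per-format if/elif cascade into a mutable set plus a final key-based sort with a band table walked from highest to lowest: heights are collected once, and each label is emitted iff some height falls in its half-open band, so no set and no sort are needed.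
import Mathlib
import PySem

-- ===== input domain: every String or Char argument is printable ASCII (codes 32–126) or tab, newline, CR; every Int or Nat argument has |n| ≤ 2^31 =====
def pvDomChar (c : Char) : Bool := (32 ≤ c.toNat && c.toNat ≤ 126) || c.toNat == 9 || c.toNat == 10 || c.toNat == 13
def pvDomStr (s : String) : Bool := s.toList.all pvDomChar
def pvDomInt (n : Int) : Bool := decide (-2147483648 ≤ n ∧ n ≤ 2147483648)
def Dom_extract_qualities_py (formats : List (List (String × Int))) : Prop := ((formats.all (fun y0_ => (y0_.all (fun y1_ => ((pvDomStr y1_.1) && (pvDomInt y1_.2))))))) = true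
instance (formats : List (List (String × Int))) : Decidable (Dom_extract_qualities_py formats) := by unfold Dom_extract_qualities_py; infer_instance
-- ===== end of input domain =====

-- B replaces A's mutable set + final key-based sort by one walk over a high-to-low band table.

-- ===== PORT A =====
-- the body of A's if/elif cascade (adds the bucket label, if any, to the set)
def pvAddQuality (q : PySem.Set String) (h : Int) : PySem.Set String :=
  if h ≥ 1440 then PySem.Set.add q "1440p"
  else if h ≥ 1080 then PySem.Set.add q "1080p"
  else if h ≥ 720 then PySem.Set.add q "720p"
  else if h ≥ 480 then PySem.Set.add q "480p"
  else if h ≥ 360 then PySem.Set.add q "360p"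
  else q

def extract_qualities_py (formats : List (List (String × Int))) : List String :=
  let qualities : PySem.Set String :=
    formats.foldl (fun q fmt =>
      match (PySem.Dict.mk fmt).get? "height" with
      | none => q
      | some h => if h ≠ 0 then pvAddQuality q h else q) PySem.Set.empty
  PySem.List.sorted qualities
    (fun x => (PySem.Int.ofStr? (PySem.Str.replace x "p" "")).getD 0) true

-- ===== PORT B =====
def pvBands : List (Int × Option Int × String) :=
  [(1440, none, "1440p"), (1080, some 1440, "1080p"),
   (720, some 1080, "720p"), (480, some 720, "480p"), (360, some 480, "360p")]

def extract_qualities_py_alt (formats : List (List (String × Int))) : List String :=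
  let heights : List Int :=
    formats.filterMap (fun f =>
      (match (PySem.Dict.mk f).get? "height" with
      | some h => if h ≠ 0 then some h else none
      | none => none : Option Int))
  (pvBands.filter (fun b =>
      heights.any (fun h =>
        b.1 ≤ h && (match b.2.1 with | none => true | some u => h < u)))).map (fun b => b.2.2)

-- ===== PRECONDITION & SPEC =====
def Spec_extract_qualities_py (formats : List (List (String × Int))) (out : List String) : Prop := out = extract_qualities_py_alt formats
instance (formats : List (List (String × Int))) (out : List String) : Decidable (Spec_extract_qualities_py formats out) := by unfold Spec_extract_qualities_py; infer_instance

-- ===== CLAIM (what is proved, stated in full; the proofs are below) =====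
def Claim_equal_extract_qualities_py : Prop := ∀ (formats : List (List (String × Int))), Dom_extract_qualities_py formats → Spec_extract_qualities_py formats (extract_qualities_py formats)

-- ===== LEMMAS AND PROOFS =====

-- the bucket label of a height, if any
def pvBucket? (h : Int) : Option String :=
  if h ≥ 1440 then some "1440p"
  else if h ≥ 1080 then some "1080p"
  else if h ≥ 720 then some "720p"
  else if h ≥ 480 then some "480p"
  else if h ≥ 360 then some "360p"
  else none

lemma pvAddQuality_eq (q : PySem.Set String) (h : Int) :
    pvAddQuality q h = match pvBucket? h with
      | some l => PySem.Set.add q l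
      | none => q := by
  unfold pvAddQuality pvBucket?; split_ifs <;> rfl

lemma pvHeights_fold (formats : List (List (String × Int))) (q : PySem.Set String) :
    formats.foldl (fun q fmt =>
      match (PySem.Dict.mk fmt).get? "height" with
      | none => q
      | some h => if h ≠ 0 then pvAddQuality q h else q) q
    = (formats.filterMap (fun f =>
        (match (PySem.Dict.mk f).get? "height" with
        | some h => if h ≠ 0 then some h else none
        | none => none : Option Int))).foldl pvAddQuality q := by
  induction formats generalizing q with
  | nil => rfl
  | cons f t ih =>
    simp only [List.foldl_cons, List.filterMap_cons]
    rcases hg : (PySem.Dict.mk f).get? "height" with _ | h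
    · exact ih q
    · simp only [hg]
      by_cases hz : h ≠ 0
      · rw [if_pos hz, if_pos hz, List.foldl_cons]; exact ih _
      · rw [if_neg hz, if_neg hz]; exact ih q

lemma pvNodup_fold (hs : List Int) (q : PySem.Set String) (hq : q.Nodup) :
    (hs.foldl pvAddQuality q).Nodup := by
  induction hs generalizing q with
  | nil => exact hq
  | cons h t ih =>
    refine ih _ ?_
    rw [pvAddQuality_eq]
    rcases pvBucket? h with _ | l
    · exact hq
    · exact PySem.Set.nodup_add q l hq

lemma pvMem_fold (hs : List Int) (q : PySem.Set String) (x : String) :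
    x ∈ hs.foldl pvAddQuality q ↔ x ∈ q ∨ ∃ h ∈ hs, pvBucket? h = some x := by
  induction hs generalizing q with
  | nil => simp
  | cons h t ih =>
    simp only [List.foldl_cons, ih, pvAddQuality_eq]
    rcases hb : pvBucket? h with _ | l
    · simp only [List.mem_cons]
      constructor
      · rintro (hx | ⟨h', hm, he⟩)
        · exact Or.inl hx
        · exact Or.inr ⟨h', Or.inr hm, he⟩
      · rintro (hx | ⟨h', (rfl | hm), he⟩)
        · exact Or.inl hx
        · rw [hb] at he; cases he
        · exact Or.inr ⟨h', hm, he⟩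
    · rw [PySem.Set.mem_add]
      constructor
      · rintro ((hx | rfl) | ⟨h', hm, he⟩)
        · exact Or.inl hx
        · exact Or.inr ⟨h, List.mem_cons_self, hb⟩
        · exact Or.inr ⟨h', List.mem_cons_of_mem _ hm, he⟩
      · rintro (hx | ⟨h', hm, he⟩)
        · exact Or.inl (Or.inl hx)
        · rcases List.mem_cons.mp hm with rfl | hm
          · rw [hb] at he; exact Or.inl (Or.inr (Option.some_injective _ he).symm)
          · exact Or.inr ⟨h', hm, he⟩

def pvLabels : List String := ["1440p", "1080p", "720p", "480p", "360p"]

def pvKey (x : String) : Int := (PySem.Int.ofStr? (PySem.Str.replace x "p" "")).getD 0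

lemma pvBucket_mem_labels (h : Int) (x : String) (hb : pvBucket? h = some x) : x ∈ pvLabels := by
  unfold pvBucket? at hb; unfold pvLabels
  split_ifs at hb <;> simp_all

lemma pvBand_iff (h : Int) (b : Int × Option Int × String) (hb : b ∈ pvBands) :
    (decide (b.1 ≤ h) && (match b.2.1 with | none => true | some u => decide (h < u))) = true
    ↔ pvBucket? h = some b.2.2 := by
  unfold pvBucket?
  fin_cases hb <;>
    (constructor
     · intro hc
       simp only [Bool.and_eq_true, decide_eq_true_eq] at hc
       split_ifs <;> first | rfl | (exfalso; omega)
     · intro hc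
       split_ifs at hc <;> simp_all)

lemma pvFilter_perm (S : List String) (hnd : S.Nodup) (hsub : ∀ x ∈ S, x ∈ pvLabels) :
    (pvLabels.filter (fun l => decide (l ∈ S))).Perm S := by
  apply List.perm_of_nodup_nodup_toFinset_eq
  · exact List.Nodup.filter _ (by decide)
  · exact hnd
  · ext x
    simp only [List.mem_toFinset, List.mem_filter, decide_eq_true_eq]
    exact ⟨fun ⟨_, hx⟩ => hx, fun hx => ⟨hsub x hx, hx⟩⟩

lemma pvSorted_eq (S : List String) (hnd : S.Nodup) (hsub : ∀ x ∈ S, x ∈ pvLabels) :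
    PySem.List.sorted S pvKey true = pvLabels.filter (fun l => decide (l ∈ S)) := by
  apply PySem.List.sorted_rev_eq_of_perm_of_pairwise_gt
  · exact pvFilter_perm S hnd hsub
  · refine List.Pairwise.filter _ ?_
    show pvLabels.Pairwise (fun a b => pvKey b < pvKey a)
    decide

-- ===== VERDICT (by name: the statement is the Claim_ definition above) =====
theorem extract_qualities_py_spec : Claim_equal_extract_qualities_py := by
  intro formats _
  show extract_qualities_py formats = extract_qualities_py_alt formats
  unfold extract_qualities_py extract_qualities_py_alt
  set heights := formats.filterMap (fun f =>
      (match (PySem.Dict.mk f).get? "height" with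
      | some h => if h ≠ 0 then some h else none
      | none => none : Option Int)) with hh
  rw [pvHeights_fold, ← hh]
  set S := heights.foldl pvAddQuality PySem.Set.empty with hS
  have hnd : S.Nodup := pvNodup_fold _ _ List.nodup_nil
  have hmem : ∀ x, x ∈ S ↔ ∃ h ∈ heights, pvBucket? h = some x := by
    intro x; rw [hS, pvMem_fold]; simp
  have hsub : ∀ x ∈ S, x ∈ pvLabels := by
    intro x hx
    obtain ⟨h, _, hb⟩ := (hmem x).mp hx
    exact pvBucket_mem_labels h x hb
  have hkey : (fun x => (PySem.Int.ofStr? (PySem.Str.replace x "p" "")).getD 0) = pvKey := rfl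
  rw [hkey, pvSorted_eq S hnd hsub]
  have hcond : ∀ b ∈ pvBands,
      (heights.any (fun h => b.1 ≤ h && (match b.2.1 with | none => true | some u => h < u)))
      = decide (b.2.2 ∈ S) := by
    intro b hb
    rw [Bool.eq_iff_iff, List.any_eq_true, decide_eq_true_eq, hmem]
    constructor
    · rintro ⟨h, hm, hc⟩
      exact ⟨h, hm, (pvBand_iff h b hb).mp hc⟩
    · rintro ⟨h, hm, hc⟩
      exact ⟨h, hm, (pvBand_iff h b hb).mpr hc⟩
  -- both sides enumerate the five labels in the same (descending) order
  show pvLabels.filter (fun l => decide (l ∈ S))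
      = (pvBands.filter (fun b =>
          heights.any (fun h =>
            b.1 ≤ h && (match b.2.1 with | none => true | some u => h < u)))).map (fun b => b.2.2)
  rw [List.filter_congr hcond]
  show pvLabels.filter (fun l => decide (l ∈ S))
      = (pvBands.filter (fun b => decide (b.2.2 ∈ S))).map (fun b => b.2.2)
  unfold pvBands pvLabels
  by_cases h1 : ("1440p":String) ∈ S <;> by_cases h2 : ("1080p":String) ∈ S <;>
    by_cases h3 : ("720p":String) ∈ S <;> by_cases h4 : ("480p":String) ∈ S <;>
    by_cases h5 : ("360p":String) ∈ S <;> simp [List.filter, h1, h2, h3, h4, h5]
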